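-- pv_equiv track=rewrite | github.com/saeid93/seldon-inference-pipelines | mlserver/mlserver-example/load-test.py | timer
-- ===== SOURCE A (Python) =====
-- def timer(data):
--     starter = 0
--     end = 0
--     flag_start = False
--     for d in range(len(data)):
--         if data[d] > 0 and flag_start == False:
--             starter = d
--             flag_start = True
--
--         if sum(data[d:]) == 0:
--             end = d
--             break
--     return starter, end
-- ===== SOURCE B (Python) =====
-- def timer(data):
--     # Pass 1 (right to left): running suffix sum; remember the smallest index
--     # whose suffix sums to zero.
--     suffix = 0
--     end = None
--     for i in reversed(range(len(data))):
--         suffix += data[i]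
--         if suffix == 0:
--             end = i
--     # Pass 2: first positive index within the part A would have scanned.
--     stop = len(data) if end is None else end + 1
--     starter = next((i for i, x in enumerate(data[:stop]) if x > 0), 0)
--     return starter, (0 if end is None else end)
-- ===== Notes on version B (the rewrite author's own statement) =====
-- stated objective: faster
-- what changed: Two staged linear passes replace A's quadratic single loop: a right-to-left scan accumulates the suffix sum and records the smallest zero-suffix index, then a left scan over the relevant prefix finds the first positive index; no flag variable and no per-index re-summation.
import Mathlib
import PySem

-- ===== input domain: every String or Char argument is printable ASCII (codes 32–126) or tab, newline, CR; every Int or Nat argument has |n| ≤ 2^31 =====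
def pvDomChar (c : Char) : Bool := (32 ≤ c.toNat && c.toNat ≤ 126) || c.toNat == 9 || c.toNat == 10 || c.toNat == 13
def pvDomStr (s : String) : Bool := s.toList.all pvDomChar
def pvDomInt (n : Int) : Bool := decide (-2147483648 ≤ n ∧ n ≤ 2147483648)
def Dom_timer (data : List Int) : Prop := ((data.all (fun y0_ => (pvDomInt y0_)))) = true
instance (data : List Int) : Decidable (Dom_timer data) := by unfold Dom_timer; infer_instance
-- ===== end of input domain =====

-- B replaces A's quadratic flagged loop (re-summing the suffix at each index) by two
-- staged linear passes: a reverse suffix-sum scan finding the end index, then a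
-- first-positive search over the relevant prefix (asymptotically faster).

-- ===== PORT A =====
-- A's loop over d in range(len(data)), carried as structural recursion over data[d:]
def timerGo : List Int → Int → Int → Bool → Int × Int
  | [], _, starter, _ => (starter, 0)
  | x :: rest, d, starter, flag_start =>
    let starter' := if x > 0 ∧ flag_start = false then d else starter
    let flag' := if x > 0 ∧ flag_start = false then true else flag_start
    if (x :: rest).sum = 0 then (starter', d)
    else timerGo rest (d + 1) starter' flag'

def timer (data : List Int) : Int × Int := timerGo data 0 0 false

-- ===== PORT B =====
-- pass 1: the reversed(range(len(data))) scan; returns (suffix sum, smallest index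
-- with zero suffix sum, as a Nat index relative to the processed suffix). Structural
-- recursion = the reverse scan: the tail (larger indices) is accumulated first, and a
-- zero suffix at the head overrides with the smaller index.
def altScan : List Int → Int × Option Nat
  | [] => (0, none)
  | x :: rest =>
    let p := altScan rest
    let s' := x + p.1
    if s' = 0 then (s', some 0) else (s', p.2.map (· + 1))

-- pass 2: next((i for i, x in enumerate(m) if x > 0), default)
def altFirstPos : List Int → Int → Int → Int
  | [], _, dflt => dflt
  | x :: rest, i, dflt => if x > 0 then i else altFirstPos rest (i + 1) dflt

def timer_alt (data : List Int) : Int × Int :=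
  let e := (altScan data).2
  let stop : Nat := match e with | none => data.length | some k => k + 1
  let starter := altFirstPos (data.take stop) 0 0
  (starter, match e with | none => 0 | some k => (k : Int))

-- ===== PRECONDITION & SPEC =====
def Spec_timer (data : List Int) (out : Int × Int) : Prop := out = timer_alt data
instance (data : List Int) (out : Int × Int) : Decidable (Spec_timer data out) := by unfold Spec_timer; infer_instance

-- ===== CLAIM (what is proved, stated in full; the proofs are below) =====
def Claim_equal_timer : Prop := ∀ (data : List Int), Dom_timer data → Spec_timer data (timer data)

-- ===== LEMMAS AND PROOFS =====

theorem altScan_fst (l : List Int) : (altScan l).1 = l.sum := by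
  induction l with
  | nil => rfl
  | cons x rest ih =>
    simp only [altScan]
    split <;> simp [ih]

theorem altScan_cons (x : Int) (rest : List Int) :
    altScan (x :: rest) =
      if x + rest.sum = 0 then (x + rest.sum, some 0)
      else (x + rest.sum, (altScan rest).2.map (· + 1)) := by
  simp only [altScan, altScan_fst]

-- main invariant: A's loop equals the staged form, for any offset/accumulator/flag
theorem go_eq (l : List Int) : ∀ (d s : Int) (f : Bool),
    timerGo l d s f =
      ((if f = true then s else
          altFirstPos (l.take (match (altScan l).2 with
            | none => l.length | some k => k + 1)) d s),
       match (altScan l).2 with | none => (0 : Int) | some k => d + k) := by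
  induction l with
  | nil => intro d s f; cases f <;> rfl
  | cons x rest ih =>
    intro d s f
    rw [altScan_cons]
    by_cases hz : x + rest.sum = 0
    · simp only [if_pos hz, timerGo, List.sum_cons]
      cases f <;> by_cases hx : x > 0 <;>
        simp [hx, altFirstPos]
    · simp only [if_neg hz, timerGo, List.sum_cons]
      cases f with
      | true =>
        have hc : ¬ (x > 0 ∧ (true : Bool) = false) := by simp
        simp only [hc, if_false, ih, if_pos rfl]
        cases hE : (altScan rest).2 <;> simp [hE] <;> ring
      | false =>
        by_cases hx : x > 0
        · have hc : (x > 0 ∧ (false : Bool) = false) := ⟨hx, rfl⟩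
          simp only [hc, if_true, if_neg hz, ih, if_pos rfl]
          cases hE : (altScan rest).2 with
          | none =>
            simp [hE, List.take_succ_cons, List.take_length, altFirstPos, hx]
          | some k =>
            simp [hE, List.take_succ_cons, altFirstPos, hx]
            ring
        · have hc : ¬ (x > 0 ∧ (false : Bool) = false) := by simp [hx]
          simp only [hc, if_false, if_neg hz, ih]
          cases hE : (altScan rest).2 with
          | none =>
            simp [hE, List.take_succ_cons, List.take_length, altFirstPos, hx]
          | some k =>
            simp [hE, List.take_succ_cons, altFirstPos, hx]
            ring

-- ===== VERDICT (by name: the statement is the Claim_ definition above) =====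
theorem timer_spec : Claim_equal_timer := by
  intro data _
  unfold Spec_timer timer timer_alt
  simpa using go_eq data 0 0 false
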